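-- pv_equiv track=rewrite | github.com/Professor-Emanuel/Codility-Problems | Python/Spooktober.py | solution
-- ===== SOURCE A (Python) =====
-- def calc(A):
--     coins = 0 ##number of coins we can move from current stack
--     for a in A:
--         coins = (coins + a) // 2
--     return coins
--
-- def solution(A):
--     answer = 0
--     ##loop over all candidates where we can accumulate coins
--     for i in range(len(A)):
--         left = A[:i]
--         right = A[i+1:]
--         ## calc function will assume that we take the coins from left to right, so we need to reverse "right"
--         coins = calc(left) + A[i] + calc(right[::-1])
--         answer = max(answer, coins)
--
--     return answer
-- ===== SOURCE B (Python) =====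
-- def solution(A):
--     # suffix folds: suf[i] = result of folding (c+a)//2 over A[i+1:] taken right-to-left
--     suf = [0]
--     last = 0
--     for a in reversed(A[1:]):
--         last = (last + a) // 2
--         suf.append(last)
--     suf.reverse()
--     best = pref = 0
--     for a, s in zip(A, suf):
--         best = max(best, pref + a + s)
--         pref = (pref + a) // 2
--     return best
-- ===== Notes on version B (the rewrite author's own statement) =====
-- stated objective: faster
-- what changed: A recomputes the left fold and the reversed-right fold from scratch for every split point; B precomputes all suffix folds in one right-to-left pass and maintains the prefix fold incrementally in a single left-to-right pass.
import Mathlib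
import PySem

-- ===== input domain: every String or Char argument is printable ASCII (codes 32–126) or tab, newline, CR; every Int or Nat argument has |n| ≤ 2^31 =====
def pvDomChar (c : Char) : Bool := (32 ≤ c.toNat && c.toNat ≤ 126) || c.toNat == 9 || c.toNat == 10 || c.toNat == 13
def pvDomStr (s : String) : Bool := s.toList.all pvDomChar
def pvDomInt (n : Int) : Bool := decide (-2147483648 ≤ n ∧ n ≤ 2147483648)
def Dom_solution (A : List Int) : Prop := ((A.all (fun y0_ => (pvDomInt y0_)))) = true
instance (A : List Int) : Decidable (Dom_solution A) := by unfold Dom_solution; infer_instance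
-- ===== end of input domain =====

-- B replaces A's quadratic scan over all split points by one linear pass using
-- incrementally maintained prefix and suffix folds (objective: faster, O(n^2) → O(n)).

-- the shared one-step fold '(coins + a) // 2' of both Pythons
def pvG (c a : Int) : Int := PySem.Int.floordiv (c + a) 2

-- ===== PORT A =====
def pvCalc (A : List Int) : Int := A.foldl (fun coins a => pvG coins a) 0

def solution (A : List Int) : Int :=
  (PySem.List.pyRange 0 (A.length : Int) 1).foldl (fun answer i =>
    let left := PySem.List.slice A none (some i)
    let right := PySem.List.slice A (some (i + 1)) none
    let coins := pvCalc left + PySem.List.pyGetD A i 0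
                 + pvCalc ((PySem.List.slice? right none none (-1)).getD [])
    max answer coins) 0

-- ===== PORT B =====
def solution_alt (A : List Int) : Int :=
  -- suffix folds, built right-to-left:  suf[i] = fold of pvG over A[i+1:] taken right-to-left
  let p := ((PySem.List.slice A (some 1) none).reverse).foldl
      (fun (st : List Int × Int) a =>
        let last := pvG st.2 a
        (st.1 ++ [last], last)) ([0], 0)
  let suf := p.1.reverse
  ((A.zip suf).foldl
      (fun (st : Int × Int) x => (max st.1 (st.2 + x.1 + x.2), pvG st.2 x.1)) (0, 0)).1

-- ===== PRECONDITION & SPEC =====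
def Spec_solution (A : List Int) (out : Int) : Prop := out = solution_alt A
instance (A : List Int) (out : Int) : Decidable (Spec_solution A out) := by unfold Spec_solution; infer_instance

-- ===== CLAIM (what is proved, stated in full; the proofs are below) =====
def Claim_equal_solution : Prop := ∀ (A : List Int), Dom_solution A → Spec_solution A (solution A)

-- ===== LEMMAS AND PROOFS =====

-- fold of pvG over a reversed list (the value calc(xs[::-1]) computes)
def pvFr (xs : List Int) : Int := xs.reverse.foldl (fun c a => pvG c a) 0

-- common middle form: best over all split points, scanning left to right
def pvMid (ans pref : Int) : List Int → Int
  | [] => ans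
  | x :: t => pvMid (max ans (pref + x + pvFr t)) (pvG pref x) t

-- the list of values B's first loop appends
def pvScan (c : Int) : List Int → List Int
  | [] => []
  | a :: ys => pvG c a :: pvScan (pvG c a) ys

-- the suffix-fold list suf, front to back
def pvSufs : List Int → List Int
  | [] => [0]
  | x :: t => pvFr (x :: t) :: pvSufs t

lemma pvFr_cons (x : Int) (t : List Int) : pvFr (x :: t) = pvG (pvFr t) x := by
  simp [pvFr, List.foldl_append]

lemma pvScan_append (c : Int) (ys zs : List Int) :
    pvScan c (ys ++ zs) = pvScan c ys ++ pvScan (ys.foldl (fun c a => pvG c a) c) zs := by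
  induction ys generalizing c with
  | nil => simp [pvScan]
  | cons a ys ih => simp [pvScan, ih]

lemma pvScan_foldl (ys : List Int) : ∀ (l : List Int) (c : Int),
    ys.foldl (fun (st : List Int × Int) a =>
        let last := pvG st.2 a
        (st.1 ++ [last], last)) (l, c)
      = (l ++ pvScan c ys, ys.foldl (fun c a => pvG c a) c) := by
  induction ys with
  | nil => simp [pvScan]
  | cons a ys ih => intro l c; simp [pvScan, ih]

lemma pvScan_reverse (t : List Int) :
    (pvScan 0 t.reverse).reverse ++ [0] = pvSufs t := by
  induction t with
  | nil => simp [pvScan, pvSufs]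
  | cons x t ih =>
      have h : pvScan 0 (t.reverse ++ [x])
          = pvScan 0 t.reverse ++ [pvG (pvFr t) x] := by
        simp [pvScan_append, pvScan, pvFr]
      simp only [List.reverse_cons, h, List.reverse_append, pvSufs, pvFr_cons]
      simp [ih]

-- B's second loop over the zipped lists is pvMid
lemma pvZip_loop (t : List Int) : ∀ (x : Int) (best pref : Int),
    (((x :: t).zip (pvSufs t)).foldl
        (fun (st : Int × Int) y => (max st.1 (st.2 + y.1 + y.2), pvG st.2 y.1)) (best, pref)).1
      = pvMid best pref (x :: t) := by
  induction t with
  | nil => intro x best pref; simp [pvSufs, pvMid, pvFr]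
  | cons y t ih =>
      intro x best pref
      simp only [pvSufs, List.zip_cons_cons, List.foldl_cons]
      exact (ih y (max best (pref + x + pvFr (y :: t))) (pvG pref x)).trans rfl

lemma solution_alt_eq_mid (A : List Int) : solution_alt A = pvMid 0 0 A := by
  cases A with
  | nil => rfl
  | cons x t =>
      show (( (x :: t).zip
          ((((PySem.List.slice (x :: t) (some 1) none).reverse).foldl
            (fun (st : List Int × Int) a => ((st.1 ++ [pvG st.2 a], pvG st.2 a))) ([0], 0)).1.reverse)).foldl
          (fun (st : Int × Int) y => (max st.1 (st.2 + y.1 + y.2), pvG st.2 y.1)) (0, 0)).1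
        = pvMid 0 0 (x :: t)
      rw [PySem.List.slice_from_one, List.tail_cons, pvScan_foldl]
      simp only [List.nil_append, List.reverse_append, List.reverse_cons, List.reverse_nil,
        List.nil_append]
      rw [show (pvScan 0 t.reverse).reverse ++ [0] = pvSufs t from pvScan_reverse t]
      exact pvZip_loop t x 0 0

-- ===== A side =====

-- the index-based body of A's loop, in Nat form, with the running prefix fold generalized
lemma pvA_loop (A : List Int) : ∀ (ans pref : Int),
    (List.range A.length).foldl (fun ans k =>
        max ans ((A.take k).foldl (fun c a => pvG c a) pref + A.getD k 0 + pvFr (A.drop (k + 1)))) ans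
      = pvMid ans pref A := by
  induction A with
  | nil => intro ans pref; simp [pvMid]
  | cons x t ih =>
      intro ans pref
      rw [List.length_cons, List.range_succ_eq_map]
      simp only [List.foldl_cons, List.take_zero, List.foldl_nil, List.getD_cons_zero,
        List.drop_succ_cons, List.drop_zero, List.foldl_map]
      have hfun : (fun (ans : Int) (k : Nat) =>
          max ans ((List.take k.succ (x :: t)).foldl (fun c a => pvG c a) pref
            + (x :: t).getD k.succ 0 + pvFr (List.drop k.succ t)))
          = (fun (ans : Int) (k : Nat) =>
          max ans ((t.take k).foldl (fun c a => pvG c a) (pvG pref x) + t.getD k 0 + pvFr (t.drop (k + 1)))) := by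
        funext a k
        simp [List.take_succ_cons]
      rw [hfun]
      exact ih _ _

lemma solution_eq_mid (A : List Int) : solution A = pvMid 0 0 A := by
  unfold solution
  rw [PySem.List.pyRange_zero_natCast, List.foldl_map]
  have hfun : (fun (answer : Int) (k : Nat) =>
      let left := PySem.List.slice A none (some (k : Int))
      let right := PySem.List.slice A (some ((k : Int) + 1)) none
      let coins := pvCalc left + PySem.List.pyGetD A (k : Int) 0
                   + pvCalc ((PySem.List.slice? right none none (-1)).getD [])
      max answer coins)
      = (fun (ans : Int) (k : Nat) =>
      max ans ((A.take k).foldl (fun c a => pvG c a) 0 + A.getD k 0 + pvFr (A.drop (k + 1)))) := by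
    funext a k
    simp only [PySem.List.slice_to_natCast, PySem.List.pyGetD_natCast]
    rw [show ((k : Int) + 1) = (((k + 1 : Nat)) : Int) by push_cast; ring,
      PySem.List.slice_from_natCast, PySem.List.slice?_none_none_neg_one]
    simp [pvCalc, pvFr]
  rw [hfun]
  exact pvA_loop A 0 0

-- ===== VERDICT (by name: the statement is the Claim_ definition above) =====
theorem solution_spec : Claim_equal_solution := by
  intro A _
  unfold Spec_solution
  rw [solution_eq_mid, solution_alt_eq_mid]
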